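-- pv_equiv track=rewrite | github.com/fpsjjang97-boop/ableton | app/core/models.py | get_scale_pitches
-- ===== SOURCE A (Python) =====
-- SCALE_INTERVALS = {
--     "major":        [0, 2, 4, 5, 7, 9, 11],
--     "minor":        [0, 2, 3, 5, 7, 8, 10],
--     "dorian":       [0, 2, 3, 5, 7, 9, 10],
--     "mixolydian":   [0, 2, 4, 5, 7, 9, 10],
--     "pentatonic":   [0, 2, 4, 7, 9],
--     "minor_penta":  [0, 3, 5, 7, 10],
--     "blues":        [0, 3, 5, 6, 7, 10],
--     "chromatic":    list(range(12)),
-- }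
--
-- def get_scale_pitches(root: int, scale_name: str) -> list[int]:
--     """Get all valid MIDI pitches for a scale across all octaves."""
--     intervals = SCALE_INTERVALS.get(scale_name, SCALE_INTERVALS["minor"])
--     pitches = []
--     for octave_base in range(0, 128, 12):
--         for iv in intervals:
--             p = octave_base + root + iv
--             if 0 <= p < 128:
--                 pitches.append(p)
--     return sorted(set(pitches))
-- ===== SOURCE B (Python) =====
-- SCALE_INTERVALS = {
--     "major":        [0, 2, 4, 5, 7, 9, 11],
--     "minor":        [0, 2, 3, 5, 7, 8, 10],
--     "dorian":       [0, 2, 3, 5, 7, 9, 10],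
--     "mixolydian":   [0, 2, 4, 5, 7, 9, 10],
--     "pentatonic":   [0, 2, 4, 7, 9],
--     "minor_penta":  [0, 3, 5, 7, 10],
--     "blues":        [0, 3, 5, 6, 7, 10],
--     "chromatic":    list(range(12)),
-- }
--
-- def get_scale_pitches(root: int, scale_name: str) -> list[int]:
--     """Get all valid MIDI pitches for a scale across all octaves."""
--     classes = set(SCALE_INTERVALS.get(scale_name, SCALE_INTERVALS["minor"]))
--     return [p for p in range(128)
--             if p >= root and (p - root) % 12 in classes]
-- ===== Notes on version B (the rewrite author's own statement) =====
-- stated objective: alternative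
-- what changed: Instead of generating octave_base+root+interval candidates over 11 octaves, filtering, deduplicating and sorting, B classifies each MIDI pitch p in range(128) directly: keep p iff p >= root and (p - root) % 12 is in the scale's interval set; the comprehension is already ascending and duplicate-free, so the set/sorted pass disappears.
-- intended difference: For root <= -5, A's fixed candidate pool (octave_base at most 120 plus interval at most 11) runs out before pitch 127, so A silently drops the in-scale MIDI pitches above root+131 (for root <= -133 it returns []); B returns every pitch in 0..127 whose pitch class is in the scale, which is the intended 'all octaves' result. — e.g. on get_scale_pitches(-5, "major"): A returns [0, 2, 4, 6, 7, 9, 11, 12, 14, 16, 18, 19, 21, 23, 24, 26, 28, 30, 31, 33, 35, 36, 38, 40, 42, 43, 45, 47, 48, 50, 52, …, B returns [0, 2, 4, 6, 7, 9, 11, 12, 14, 16, 18, 19, 21, 23, 24, 26, 28, 30, 31, 33, 35, 36, 38, 40, 42, 43, 45, 47, 48, 50, 52, …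
import Mathlib
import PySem

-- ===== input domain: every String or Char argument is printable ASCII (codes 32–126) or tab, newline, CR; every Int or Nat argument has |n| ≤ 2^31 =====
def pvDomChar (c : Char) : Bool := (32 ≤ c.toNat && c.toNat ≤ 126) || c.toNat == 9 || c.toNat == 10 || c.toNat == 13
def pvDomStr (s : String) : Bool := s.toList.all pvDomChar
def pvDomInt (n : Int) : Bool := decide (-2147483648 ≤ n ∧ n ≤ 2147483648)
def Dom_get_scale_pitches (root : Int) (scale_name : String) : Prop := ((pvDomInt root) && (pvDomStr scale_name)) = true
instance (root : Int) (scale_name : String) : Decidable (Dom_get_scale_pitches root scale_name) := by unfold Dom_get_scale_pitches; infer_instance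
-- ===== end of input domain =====

-- B replaces A's generate/filter/dedup/sort over 11 octaves of candidates by one pitch-class classification pass over range(128); for root ≤ -5 A's candidate cap truncates the result and B returns the full scale there (see D_).

-- ===== PORT A =====
-- module constant SCALE_INTERVALS (shared by Source A and Source B)
def pvScaleIntervals : PySem.Dict String (List Int) :=
  ((((((((PySem.Dict.empty.insert "major" [0, 2, 4, 5, 7, 9, 11]).insert
      "minor" [0, 2, 3, 5, 7, 8, 10]).insert
      "dorian" [0, 2, 3, 5, 7, 9, 10]).insert
      "mixolydian" [0, 2, 4, 5, 7, 9, 10]).insert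
      "pentatonic" [0, 2, 4, 7, 9]).insert
      "minor_penta" [0, 3, 5, 7, 10]).insert
      "blues" [0, 3, 5, 6, 7, 10]).insert
      "chromatic" (PySem.List.pyRange 0 12 1))

def get_scale_pitches (root : Int) (scale_name : String) : List Int :=
  let intervals := pvScaleIntervals.getD scale_name ((pvScaleIntervals.get? "minor").getD [])
  let pitches := (PySem.List.pyRange 0 128 12).foldl (fun acc octave_base =>
    intervals.foldl (fun acc iv =>
      let p := octave_base + root + iv
      if 0 ≤ p ∧ p < 128 then acc ++ [p] else acc) acc) []
  PySem.List.sorted (PySem.Set.ofList pitches) (fun x => x) false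

-- ===== PORT B =====
def get_scale_pitches_alt (root : Int) (scale_name : String) : List Int :=
  let classes : PySem.Set Int :=
    PySem.Set.ofList (pvScaleIntervals.getD scale_name ((pvScaleIntervals.get? "minor").getD []))
  (PySem.List.pyRange 0 128 1).filter (fun p =>
    decide (root ≤ p) && classes.contains (PySem.Int.mod (p - root) 12))

-- ===== PRECONDITION & SPEC =====
-- For root ≤ -5 A's candidate pool (octave_base ≤ 120, interval ≤ 11) runs out before MIDI pitch 127, so A silently drops the in-scale pitches above root+131; B keeps every in-range pitch of the scale, which is the intended "all octaves" result.
def D_get_scale_pitches (root : Int) (scale_name : String) : Prop := root ≤ -5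
instance (root : Int) (scale_name : String) : Decidable (D_get_scale_pitches root scale_name) := by unfold D_get_scale_pitches; infer_instance
def Spec_get_scale_pitches (root : Int) (scale_name : String) (out : List Int) : Prop := ¬ D_get_scale_pitches root scale_name → out = get_scale_pitches_alt root scale_name
instance (root : Int) (scale_name : String) (out : List Int) : Decidable (Spec_get_scale_pitches root scale_name out) := by unfold Spec_get_scale_pitches; infer_instance

def pvDiffWitness_get_scale_pitches : Int × String := (-5, "major")
def pvDiffWitnessOut_get_scale_pitches : (List Int) × (List Int) :=
  ([0, 2, 4, 6, 7, 9, 11, 12, 14, 16, 18, 19, 21, 23, 24, 26, 28, 30, 31, 33, 35, 36, 38, 40, 42, 43, 45, 47, 48, 50, 52, 54, 55, 57, 59, 60, 62, 64, 66, 67, 69, 71, 72, 74, 76, 78, 79, 81, 83, 84, 86, 88, 90, 91, 93, 95, 96, 98, 100, 102, 103, 105, 107, 108, 110, 112, 114, 115, 117, 119, 120, 122, 124, 126],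
   [0, 2, 4, 6, 7, 9, 11, 12, 14, 16, 18, 19, 21, 23, 24, 26, 28, 30, 31, 33, 35, 36, 38, 40, 42, 43, 45, 47, 48, 50, 52, 54, 55, 57, 59, 60, 62, 64, 66, 67, 69, 71, 72, 74, 76, 78, 79, 81, 83, 84, 86, 88, 90, 91, 93, 95, 96, 98, 100, 102, 103, 105, 107, 108, 110, 112, 114, 115, 117, 119, 120, 122, 124, 126, 127])

-- ===== CLAIM (what is proved, stated in full; the proofs are below) =====
def Claim_unchanged_get_scale_pitches : Prop := ∀ (root : Int) (scale_name : String), Dom_get_scale_pitches root scale_name → Spec_get_scale_pitches root scale_name (get_scale_pitches root scale_name)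
def Claim_changed_get_scale_pitches : Prop := Dom_get_scale_pitches (pvDiffWitness_get_scale_pitches.1) (pvDiffWitness_get_scale_pitches.2) ∧ D_get_scale_pitches (pvDiffWitness_get_scale_pitches.1) (pvDiffWitness_get_scale_pitches.2) ∧ get_scale_pitches (pvDiffWitness_get_scale_pitches.1) (pvDiffWitness_get_scale_pitches.2) = pvDiffWitnessOut_get_scale_pitches.1 ∧ get_scale_pitches_alt (pvDiffWitness_get_scale_pitches.1) (pvDiffWitness_get_scale_pitches.2) = pvDiffWitnessOut_get_scale_pitches.2 ∧ pvDiffWitnessOut_get_scale_pitches.1 ≠ pvDiffWitnessOut_get_scale_pitches.2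
def Claim_exact_get_scale_pitches : Prop := ∀ (root : Int) (scale_name : String), Dom_get_scale_pitches root scale_name → D_get_scale_pitches root scale_name → get_scale_pitches root scale_name ≠ get_scale_pitches_alt root scale_name

-- ===== LEMMAS AND PROOFS =====

-- a property holding for all values of a dict and for the default holds for getD
lemma pv_getD_prop {P : List Int → Prop} (d : PySem.Dict String (List Int)) (k : String)
    (dflt : List Int) (hv : ∀ v ∈ d.values, P v) (hd : P dflt) : P (d.getD k dflt) := by
  unfold PySem.Dict.getD
  cases h : d.get? k with
  | none => simpa using hd
  | some v =>
    simp only [Option.getD_some]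
    apply hv
    unfold PySem.Dict.get? at h
    obtain ⟨p, hp, rfl⟩ := Option.map_eq_some_iff.mp h
    exact List.mem_map_of_mem (List.mem_of_find?_eq_some hp)

-- every interval list the lookup can return has entries in [0, 12)
lemma pv_iv_bounds (s : String) :
    ∀ iv ∈ pvScaleIntervals.getD s ((pvScaleIntervals.get? "minor").getD []), 0 ≤ iv ∧ iv < 12 := by
  apply pv_getD_prop (P := fun l => ∀ iv ∈ l, 0 ≤ iv ∧ iv < 12)
  · exact (by decide : ∀ v ∈ pvScaleIntervals.values, ∀ iv ∈ v, 0 ≤ iv ∧ iv < 12)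
  · decide

-- every interval list the lookup can return contains 0 (the root's own pitch class)
lemma pv_iv_zero (s : String) :
    0 ∈ pvScaleIntervals.getD s ((pvScaleIntervals.get? "minor").getD []) := by
  apply pv_getD_prop (P := fun l => 0 ∈ l)
  · exact (by decide : ∀ v ∈ pvScaleIntervals.values, 0 ∈ v)
  · decide

-- membership in A's raw pitch list, characterised arithmetically
lemma pv_mem_pitches (root : Int) (ivs : List Int) (hiv : ∀ iv ∈ ivs, 0 ≤ iv ∧ iv < 12) (x : Int) :
    (x ∈ (PySem.List.pyRange 0 128 12).foldl (fun acc octave_base =>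
        ivs.foldl (fun acc iv =>
          if 0 ≤ octave_base + root + iv ∧ octave_base + root + iv < 128 then
            acc ++ [octave_base + root + iv] else acc) acc) []) ↔
      (0 ≤ x ∧ x < 128) ∧ 0 ≤ x - root ∧ x - root < 132 ∧ (x - root) % 12 ∈ ivs := by
  have hinner : ∀ (ob : Int) (acc : List Int),
      ivs.foldl (fun acc iv =>
        if 0 ≤ ob + root + iv ∧ ob + root + iv < 128 then acc ++ [ob + root + iv] else acc) acc
        = acc ++ (ivs.filter (fun iv => decide (0 ≤ ob + root + iv ∧ ob + root + iv < 128))).map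
            (fun iv => ob + root + iv) := by
    intro ob acc
    have := PySem.List.foldl_append_if
      (fun iv => decide (0 ≤ ob + root + iv ∧ ob + root + iv < 128))
      (fun iv => ob + root + iv) ivs acc
    simpa using this
  have houter : (PySem.List.pyRange 0 128 12).foldl (fun acc octave_base =>
      ivs.foldl (fun acc iv =>
        if 0 ≤ octave_base + root + iv ∧ octave_base + root + iv < 128 then
          acc ++ [octave_base + root + iv] else acc) acc) []
      = (PySem.List.pyRange 0 128 12).flatMap (fun ob =>
          (ivs.filter (fun iv => decide (0 ≤ ob + root + iv ∧ ob + root + iv < 128))).map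
            (fun iv => ob + root + iv)) := by
    have hfun : (fun (acc : List Int) (octave_base : Int) =>
        ivs.foldl (fun acc iv =>
          if 0 ≤ octave_base + root + iv ∧ octave_base + root + iv < 128 then
            acc ++ [octave_base + root + iv] else acc) acc)
        = (fun acc ob => acc ++ (ivs.filter
            (fun iv => decide (0 ≤ ob + root + iv ∧ ob + root + iv < 128))).map
            (fun iv => ob + root + iv)) := by
      funext acc ob
      exact hinner ob acc
    rw [hfun]
    simpa using PySem.List.foldl_append_eq_flatMap
      (fun ob => (ivs.filter (fun iv => decide (0 ≤ ob + root + iv ∧ ob + root + iv < 128))).map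
        (fun iv => ob + root + iv)) (PySem.List.pyRange 0 128 12) []
  rw [houter]
  simp only [List.mem_flatMap, List.mem_map, List.mem_filter, decide_eq_true_eq,
    PySem.List.mem_pyRange_iff_of_pos (by norm_num : (0:Int) < 12)]
  constructor
  · rintro ⟨ob, ⟨h0, h1, hdvd⟩, iv, ⟨hivmem, hp0, hp1⟩, rfl⟩
    have hb := hiv iv hivmem
    have hmod : (ob + root + iv - root) % 12 = iv := by omega
    exact ⟨⟨hp0, hp1⟩, by omega, by omega, by rw [hmod]; exact hivmem⟩
  · rintro ⟨⟨hx0, hx1⟩, hd0, hd1, hmem⟩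
    have hb := hiv _ hmem
    refine ⟨(x - root) - (x - root) % 12, ⟨by omega, by omega, by omega⟩,
      (x - root) % 12, ⟨hmem, by omega, by omega⟩, by omega⟩

-- membership in A's final (sorted, deduplicated) result
lemma pv_mem_A (root : Int) (scale_name : String) (x : Int) :
    x ∈ get_scale_pitches root scale_name ↔
      (0 ≤ x ∧ x < 128) ∧ 0 ≤ x - root ∧ x - root < 132 ∧
        (x - root) % 12 ∈ pvScaleIntervals.getD scale_name ((pvScaleIntervals.get? "minor").getD []) := by
  unfold get_scale_pitches
  rw [PySem.List.mem_sorted, PySem.Set.mem_ofList,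
    pv_mem_pitches root _ (pv_iv_bounds scale_name) x]

-- membership in B's result
lemma pv_mem_B (root : Int) (scale_name : String) (x : Int) :
    x ∈ get_scale_pitches_alt root scale_name ↔
      (0 ≤ x ∧ x < 128) ∧ root ≤ x ∧
        (x - root) % 12 ∈ pvScaleIntervals.getD scale_name ((pvScaleIntervals.get? "minor").getD []) := by
  unfold get_scale_pitches_alt
  simp only [List.mem_filter, PySem.List.mem_pyRange_one, Bool.and_eq_true, decide_eq_true_eq,
    PySem.Set.contains, List.contains_iff_mem, PySem.Set.mem_ofList]
  constructor
  · rintro ⟨⟨h0, h1⟩, hr, hm⟩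
    rw [PySem.Int.mod_eq_emod_of_pos (by norm_num : (0:Int) < 12)] at hm
    exact ⟨⟨h0, h1⟩, hr, hm⟩
  · rintro ⟨⟨h0, h1⟩, hr, hm⟩
    rw [PySem.Int.mod_eq_emod_of_pos (by norm_num : (0:Int) < 12)]
    exact ⟨⟨h0, h1⟩, hr, hm⟩

lemma pv_pairwise_A (root : Int) (scale_name : String) :
    List.Pairwise (· < ·) (get_scale_pitches root scale_name) := by
  unfold get_scale_pitches
  exact PySem.List.sorted_ofList_pairwise_lt _

lemma pv_pairwise_B (root : Int) (scale_name : String) :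
    List.Pairwise (· < ·) (get_scale_pitches_alt root scale_name) := by
  unfold get_scale_pitches_alt
  exact (PySem.List.pairwise_lt_pyRange_one 0 128).sublist List.filter_sublist

-- ===== VERDICT (by name: the statements are the Claim_ definitions above) =====
theorem get_scale_pitches_spec : Claim_unchanged_get_scale_pitches := by
  intro root scale_name _ hD
  have hroot : -4 ≤ root := by
    unfold D_get_scale_pitches at hD; omega
  have hA := pv_pairwise_A root scale_name
  have hB := pv_pairwise_B root scale_name
  refine ((List.perm_ext_iff_of_nodup (hA.imp ne_of_lt) (hB.imp ne_of_lt)).mpr ?_).eq_of_pairwise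
    (fun a b _ _ hab hba => absurd hba (lt_asymm hab)) hA hB
  intro x
  rw [pv_mem_A, pv_mem_B]
  constructor
  · rintro ⟨h1, h2, _, h4⟩; exact ⟨h1, by omega, h4⟩
  · rintro ⟨h1, h2, h3⟩; exact ⟨h1, by omega, by omega, h3⟩

set_option maxRecDepth 100000 in
theorem get_scale_pitches_changed : Claim_changed_get_scale_pitches := by
  unfold Claim_changed_get_scale_pitches; decide

theorem get_scale_pitches_tight : Claim_exact_get_scale_pitches := by
  intro root scale_name _ hD heq
  unfold D_get_scale_pitches at hD
  -- the witness pitch p ∈ B \ A: root+132 if it is a valid MIDI pitch, else the root's own class in [0,12)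
  by_cases h : -132 ≤ root
  · have hmemB : (root + 132) ∈ get_scale_pitches_alt root scale_name := by
      rw [pv_mem_B]
      have : (root + 132 - root) % 12 = 0 := by omega
      exact ⟨⟨by omega, by omega⟩, by omega, by rw [this]; exact pv_iv_zero scale_name⟩
    have hmemA : (root + 132) ∉ get_scale_pitches root scale_name := by
      rw [pv_mem_A]; omega
    rw [heq] at hmemA; exact hmemA hmemB
  · have hmemB : (root % 12) ∈ get_scale_pitches_alt root scale_name := by
      rw [pv_mem_B]
      have h0 : 0 ≤ root % 12 := Int.emod_nonneg root (by norm_num)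
      have h1 : root % 12 < 12 := Int.emod_lt_of_pos root (by norm_num)
      have hm : (root % 12 - root) % 12 = 0 := by omega
      exact ⟨⟨h0, by omega⟩, by omega, by rw [hm]; exact pv_iv_zero scale_name⟩
    have hmemA : (root % 12) ∉ get_scale_pitches root scale_name := by
      rw [pv_mem_A]
      have h0 : 0 ≤ root % 12 := Int.emod_nonneg root (by norm_num)
      have h1 : root % 12 < 12 := Int.emod_lt_of_pos root (by norm_num)
      omega
    rw [heq] at hmemA; exact hmemA hmemB
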